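-- pv_equiv track=rewrite | github.com/Cpaul777/docai_parse_codes | handle_data_expense.py | norm_zip_code
-- ===== SOURCE A (Python) =====
-- def norm_zip_code(zip_code):
--     """
--     Normalize ZIP code strings to a standard 4-digit format.
--
--     Args:
--         zip_code (str): The ZIP code string to normalize.
--
--     Returns:
--         str: The normalized ZIP code string in 'XXXX' format.
--     """
--     mapping = {"O": "0", "o": "0", "I": "1", "l": "1", "S": "5", "p":"0"}
--     for k, v in mapping.items():
--         zip_code = zip_code.replace(k, v)
--
--     zip_code = ''.join(filter(str.isdigit, zip_code))  # Remove non-numeric characters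
--     if len(zip_code) == 4:
--         return zip_code
--     else:
--         return (zip_code + " [INVALID]")
-- ===== SOURCE B (Python) =====
-- def norm_zip_code(zip_code):
--     """Single pass over the characters of zip_code: map each char through the
--     substitution table and keep it only if the result is a digit."""
--     mapping = {"O": "0", "o": "0", "I": "1", "l": "1", "S": "5", "p": "0"}
--     out = []
--     for c in zip_code:
--         m = mapping.get(c, c)
--         if m.isdigit():
--             out.append(m)
--     res = ''.join(out)
--     if len(res) == 4:
--         return res
--     else:
--         return res + " [INVALID]"
-- ===== Notes on version B (the rewrite author's own statement) =====
-- stated objective: simpler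
-- what changed: B scans the input string once, mapping each character through the table and keeping it only if the mapped character is a digit, instead of A's six full-string replace passes followed by a separate filter pass.
import Mathlib
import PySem

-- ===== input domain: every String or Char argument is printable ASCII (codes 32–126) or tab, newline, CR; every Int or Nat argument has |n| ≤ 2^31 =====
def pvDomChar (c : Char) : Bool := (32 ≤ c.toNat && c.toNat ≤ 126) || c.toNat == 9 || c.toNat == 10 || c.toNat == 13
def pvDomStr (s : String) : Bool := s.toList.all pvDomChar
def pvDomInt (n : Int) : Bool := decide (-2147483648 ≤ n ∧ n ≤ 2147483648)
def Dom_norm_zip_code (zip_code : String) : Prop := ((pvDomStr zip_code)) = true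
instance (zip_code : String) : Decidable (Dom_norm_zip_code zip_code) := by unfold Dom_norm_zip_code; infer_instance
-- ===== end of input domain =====

-- B replaces A's six whole-string replace passes plus a filter pass with one scan over the
-- input characters (map through the table, keep digits); objective: simpler.

-- ===== PORT A =====
def norm_zip_code (zip_code : String) : String :=
  let mapping : PySem.Dict String String :=
    PySem.Dict.ofList [("O","0"),("o","0"),("I","1"),("l","1"),("S","5"),("p","0")]
  let z1 := mapping.items.foldl (fun z kv => PySem.Str.replace z kv.1 kv.2) zip_code
  -- ''.join(filter(str.isdigit, zip_code)): keep the digit characters, in order (exact)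
  let z2 := String.mk (z1.toList.filter PySem.Chars.isdigit)
  if PySem.Str.len z2 = 4 then z2
  else String.mk (z2.toList ++ " [INVALID]".toList)  -- string concatenation, exact

-- ===== PORT B =====
def norm_zip_code_alt (zip_code : String) : String :=
  let mapping : PySem.Dict Char Char :=
    PySem.Dict.ofList [('O','0'),('o','0'),('I','1'),('l','1'),('S','5'),('p','0')]
  let out := zip_code.toList.foldl (fun acc c =>
      let m := mapping.getD c c
      if PySem.Chars.isdigit m then acc ++ [m] else acc) []
  let res := String.mk out
  if PySem.Str.len res = 4 then res
  else String.mk (res.toList ++ " [INVALID]".toList)  -- string concatenation, exact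

-- ===== PRECONDITION & SPEC =====
def Spec_norm_zip_code (zip_code : String) (out : String) : Prop := out = norm_zip_code_alt zip_code
instance (zip_code : String) (out : String) : Decidable (Spec_norm_zip_code zip_code out) := by unfold Spec_norm_zip_code; infer_instance

-- ===== CLAIM (what is proved, stated in full; the proofs are below) =====
def Claim_equal_norm_zip_code : Prop := ∀ (zip_code : String), Dom_norm_zip_code zip_code → Spec_norm_zip_code zip_code (norm_zip_code zip_code)

-- ===== LEMMAS AND PROOFS =====

-- Chars.replace with a single-character pattern is a per-character map.
theorem replace_go_single (k v : Char) :
    ∀ (l acc : List Char) (fuel : Nat), l.length ≤ fuel →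
      PySem.Chars.replace.go [k] [v] fuel l acc
        = acc.reverse ++ l.map (fun c => if c = k then v else c) := by
  intro l
  induction l with
  | nil =>
      intro acc fuel _
      cases fuel <;> simp [PySem.Chars.replace.go]
  | cons c t ih =>
      intro acc fuel hf
      cases fuel with
      | zero => simp at hf
      | succ f =>
        have ht : t.length ≤ f := by simpa using hf
        by_cases hc : c = k
        · subst hc
          simp [PySem.Chars.replace.go, List.isPrefixOf, ih _ _ ht]
        · simp [PySem.Chars.replace.go, List.isPrefixOf, hc, ih _ _ ht,
                (by simpa [BEq.beq] using (beq_eq_false_iff_ne (a := k) (b := c)).2 (Ne.symm hc) : (k == c) = false)]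

theorem replace_single (k v : Char) (cs : List Char) :
    PySem.Chars.replace cs [k] [v] = cs.map (fun c => if c = k then v else c) := by
  simp [PySem.Chars.replace, replace_go_single k v cs [] cs.length le_rfl]

-- The composition of A's six replacements, as one character map.
def zipMapA (c : Char) : Char :=
  if c = 'O' then '0' else if c = 'o' then '0' else if c = 'I' then '1'
  else if c = 'l' then '1' else if c = 'S' then '5' else if c = 'p' then '0' else c

-- B's per-character table lookup computes the same character.
theorem itemsB :
    (PySem.Dict.ofList [('O','0'),('o','0'),('I','1'),('l','1'),('S','5'),('p','0')]
        : PySem.Dict Char Char).items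
      = [('O','0'),('o','0'),('I','1'),('l','1'),('S','5'),('p','0')] := by decide

theorem getD_eq_zipMapA (c : Char) :
    (PySem.Dict.ofList [('O','0'),('o','0'),('I','1'),('l','1'),('S','5'),('p','0')]).getD c c
      = zipMapA c := by
  by_cases h1 : c = 'O'; · subst h1; decide
  by_cases h2 : c = 'o'; · subst h2; decide
  by_cases h3 : c = 'I'; · subst h3; decide
  by_cases h4 : c = 'l'; · subst h4; decide
  by_cases h5 : c = 'S'; · subst h5; decide
  by_cases h6 : c = 'p'; · subst h6; decide
  have e1 : ('O' == c) = false := beq_eq_false_iff_ne.2 (Ne.symm h1)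
  have e2 : ('o' == c) = false := beq_eq_false_iff_ne.2 (Ne.symm h2)
  have e3 : ('I' == c) = false := beq_eq_false_iff_ne.2 (Ne.symm h3)
  have e4 : ('l' == c) = false := beq_eq_false_iff_ne.2 (Ne.symm h4)
  have e5 : ('S' == c) = false := beq_eq_false_iff_ne.2 (Ne.symm h5)
  have e6 : ('p' == c) = false := beq_eq_false_iff_ne.2 (Ne.symm h6)
  simp [PySem.Dict.getD, PySem.Dict.get?, itemsB, List.find?, e1, e2, e3, e4, e5, e6,
    zipMapA, h1, h2, h3, h4, h5, h6]

-- A's replace chain on the character list is the single map by zipMapA.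
theorem itemsA :
    (PySem.Dict.ofList [("O","0"),("o","0"),("I","1"),("l","1"),("S","5"),("p","0")]
        : PySem.Dict String String).items
      = [("O","0"),("o","0"),("I","1"),("l","1"),("S","5"),("p","0")] := by decide

theorem replace_chain_eq_map (cs : List Char) :
    ((PySem.Dict.ofList [("O","0"),("o","0"),("I","1"),("l","1"),("S","5"),("p","0")]
        : PySem.Dict String String).items.foldl
      (fun z kv => PySem.Chars.replace z kv.1.toList kv.2.toList) cs)
      = cs.map zipMapA := by
  rw [itemsA]
  simp only [List.foldl]
  simp only [show ("O":String).toList = ['O'] from rfl, show ("o":String).toList = ['o'] from rfl,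
    show ("I":String).toList = ['I'] from rfl, show ("l":String).toList = ['l'] from rfl,
    show ("S":String).toList = ['S'] from rfl, show ("5":String).toList = ['5'] from rfl,
    show ("0":String).toList = ['0'] from rfl, show ("1":String).toList = ['1'] from rfl,
    show ("p":String).toList = ['p'] from rfl]
  simp only [replace_single]
  simp only [List.map_map]
  apply List.map_congr_left
  intro c _
  simp only [Function.comp, zipMapA]
  by_cases h1 : c = 'O' <;> by_cases h2 : c = 'o' <;> by_cases h3 : c = 'I' <;>
    by_cases h4 : c = 'l' <;> by_cases h5 : c = 'S' <;> by_cases h6 : c = 'p' <;>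
    simp_all

-- ===== VERDICT (by name: the statement is the Claim_ definition above) =====
theorem norm_zip_code_spec : Claim_equal_norm_zip_code := by
  intro s _
  unfold Spec_norm_zip_code norm_zip_code norm_zip_code_alt
  have hA : ((PySem.Dict.ofList [("O","0"),("o","0"),("I","1"),("l","1"),("S","5"),("p","0")]
        : PySem.Dict String String).items.foldl
          (fun z kv => PySem.Str.replace z kv.1 kv.2) s).toList
      = s.toList.map zipMapA := by
    rw [← replace_chain_eq_map s.toList, itemsA]
    simp [PySem.Str.toList_replace]
  have hB : s.toList.foldl (fun acc c =>
      let m := (PySem.Dict.ofList [('O','0'),('o','0'),('I','1'),('l','1'),('S','5'),('p','0')]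
        : PySem.Dict Char Char).getD c c
      if PySem.Chars.isdigit m then acc ++ [m] else acc) ([] : List Char)
      = (s.toList.filter (fun c => PySem.Chars.isdigit (zipMapA c))).map zipMapA := by
    simp only [getD_eq_zipMapA]
    simpa using PySem.List.foldl_append_if (fun c => PySem.Chars.isdigit (zipMapA c)) zipMapA
      s.toList ([] : List Char)
  have hkey : (s.toList.map zipMapA).filter PySem.Chars.isdigit
      = (s.toList.filter (fun c => PySem.Chars.isdigit (zipMapA c))).map zipMapA := by
    rw [List.filter_map]
    rfl
  simp only [hA, hB, hkey]
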